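-- pv_equiv track=rewrite | github.com/bertichelucas/Algo1---Ejercicios | TP4_Bazas/main.py | centrar_cartas
-- ===== SOURCE A (Python) =====
-- def centrar_cartas(ronda):
--     '''
--     Recibe el numero de cartas de una baraja y devuelve las coordenadas en pixeles para que quede centrada.
--     '''
--     limite = 460
--     contador = 70
--     lista = []
--     dimension_carta = 70
--     for _ in range(ronda):
--         lista.append(dimension_carta)
--         contador += dimension_carta
--     while contador > limite:
--         for i in range(len(lista)):
--             lista[i] -= 1
--         contador -= ronda
--     return(lista[0])
-- ===== SOURCE B (Python) =====
-- def centrar_cartas(ronda):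
--     '''
--     Recibe el numero de cartas de una baraja y devuelve las coordenadas en pixeles para que quede centrada.
--     '''
--     exceso = 70 * ronda - 390
--     if exceso <= 0:
--         return 70
--     return 70 - (-(-exceso // ronda))
-- ===== Notes on version B (the rewrite author's own statement) =====
-- stated objective: faster
-- what changed: Replaces the list-building loop and the element-decrementing while loop by a closed-form ceiling division computing the number of decrement iterations directly.
import Mathlib
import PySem

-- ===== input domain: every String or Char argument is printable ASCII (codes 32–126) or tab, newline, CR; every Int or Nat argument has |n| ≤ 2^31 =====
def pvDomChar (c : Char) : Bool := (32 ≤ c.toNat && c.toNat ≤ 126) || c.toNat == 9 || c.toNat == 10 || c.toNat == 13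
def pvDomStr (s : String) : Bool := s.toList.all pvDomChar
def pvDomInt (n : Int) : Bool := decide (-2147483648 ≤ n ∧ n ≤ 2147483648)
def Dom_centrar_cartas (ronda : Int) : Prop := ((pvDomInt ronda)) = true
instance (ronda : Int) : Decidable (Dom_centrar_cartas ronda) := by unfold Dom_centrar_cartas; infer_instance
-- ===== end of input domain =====

-- B replaces the two loops of A by one closed-form ceiling division (O(1) vs O(ronda^2)).

-- ===== PORT A =====
-- the while loop: decrement every list element, subtract ronda from contador, until contador ≤ 460.
-- The extra '0 < ronda' in the guard only makes the recursion total: when ronda ≤ 0 the Python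
-- while loop is never entered (contador = 70 + 70*ronda ≤ 70 ≤ 460), so the guard is never reached there.
def centrarLoopA (ronda contador : Int) (lista : List Int) : List Int × Int :=
  if h : 460 < contador ∧ 0 < ronda then
    centrarLoopA ronda (contador - ronda) (lista.map (· - 1))
  else (lista, contador)
termination_by (contador - 460).toNat
decreasing_by omega

def centrar_cartas (ronda : Int) : Int :=
  -- limite = 460, contador = 70, lista = [], dimension_carta = 70
  let built := (PySem.List.pyRange 0 ronda 1).foldl
      (fun (st : List Int × Int) _ => (st.1 ++ [70], st.2 + 70)) ([], 70)
  let fin := centrarLoopA ronda built.2 built.1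
  -- lista[0]; Pre_ guarantees the list is nonempty (IndexError excluded otherwise)
  (PySem.List.pyGet? fin.1 0).getD 0

-- ===== PORT B =====
def centrar_cartas_alt (ronda : Int) : Int :=
  let exceso := 70 * ronda - 390
  if exceso ≤ 0 then 70
  else 70 - (-(PySem.Int.floordiv (-exceso) ronda))

-- ===== PRECONDITION & SPEC =====
-- Pre_ excludes ronda ≤ 0: there A raises IndexError (lista[0] on the empty list); B returns 70 there.
def Pre_centrar_cartas (ronda : Int) : Prop := 1 ≤ ronda
instance (ronda : Int) : Decidable (Pre_centrar_cartas ronda) := by unfold Pre_centrar_cartas; infer_instance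
def pvWitness_centrar_cartas : Int := 6

def Spec_centrar_cartas (ronda : Int) (out : Int) : Prop := out = centrar_cartas_alt ronda
instance (ronda : Int) (out : Int) : Decidable (Spec_centrar_cartas ronda out) := by unfold Spec_centrar_cartas; infer_instance

-- ===== CLAIM (what is proved, stated in full; the proofs are below) =====
def Claim_equal_centrar_cartas : Prop := ∀ (ronda : Int), Dom_centrar_cartas ronda → Pre_centrar_cartas ronda → Spec_centrar_cartas ronda (centrar_cartas ronda)

-- ===== LEMMAS AND PROOFS =====

-- number of iterations of A's while loop
def stepCount (ronda contador : Int) : Int :=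
  if h : 460 < contador ∧ 0 < ronda then stepCount ronda (contador - ronda) + 1 else 0
termination_by (contador - 460).toNat
decreasing_by omega

theorem foldl_build (l : List Int) (acc1 : List Int) (acc2 : Int) :
    l.foldl (fun (st : List Int × Int) _ => (st.1 ++ [70], st.2 + 70)) (acc1, acc2)
      = (acc1 ++ List.replicate l.length 70, acc2 + 70 * l.length) := by
  induction l generalizing acc1 acc2 with
  | nil => simp
  | cons x xs ih =>
      simp only [List.foldl_cons, ih, List.length_cons, Prod.mk.injEq]
      refine ⟨by simp [List.replicate_succ, List.append_assoc], by push_cast; ring⟩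

theorem loopA_replicate (ronda : Int) (contador : Int) (n : Nat) (v : Int) :
    (centrarLoopA ronda contador (List.replicate n v)).1
      = List.replicate n (v - stepCount ronda contador) := by
  suffices H : ∀ (k : Nat) (c : Int), (c - 460).toNat = k → ∀ (v : Int),
      (centrarLoopA ronda c (List.replicate n v)).1
        = List.replicate n (v - stepCount ronda c) by
    exact H _ contador rfl v
  intro k
  induction k using Nat.strong_induction_on with
  | _ k ih =>
      intro c hc v
      rw [centrarLoopA, stepCount]
      by_cases h : 460 < c ∧ 0 < ronda
      · rw [dif_pos h, dif_pos h, List.map_replicate,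
          ih ((c - ronda - 460).toNat) (by omega) (c - ronda) rfl (v - 1)]
        congr 1
        ring
      · rw [dif_neg h, dif_neg h]
        simp

-- closed form for the iteration count: ceiling division
theorem stepCount_closed (ronda : Int) (hr : 0 < ronda) (contador : Int) :
    stepCount ronda contador
      = if contador - 460 ≤ 0 then 0 else -(PySem.Int.floordiv (-(contador - 460)) ronda) := by
  suffices H : ∀ (k : Nat) (c : Int), (c - 460).toNat = k →
      stepCount ronda c
        = if c - 460 ≤ 0 then 0 else -(PySem.Int.floordiv (-(c - 460)) ronda) by
    exact H _ contador rfl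
  intro k
  induction k using Nat.strong_induction_on with
  | _ k ih =>
      intro c hc
      rw [stepCount]
      by_cases h : 460 < c ∧ 0 < ronda
      · rw [dif_pos h, ih ((c - ronda - 460).toNat) (by omega) (c - ronda) rfl]
        have h460 : ¬ (c - 460 ≤ 0) := by omega
        rw [if_neg h460]
        by_cases h2 : c - ronda - 460 ≤ 0
        · rw [if_pos h2]
          have : -(PySem.Int.floordiv (-(c - 460)) ronda) = 1 := by
            rw [PySem.Int.neg_floordiv_neg_eq_iff_of_pos hr]
            constructor <;> nlinarith [h.1, h2, hr]
          omega
        · rw [if_neg h2, PySem.Int.floordiv_eq_ediv_of_pos hr,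
            PySem.Int.floordiv_eq_ediv_of_pos hr]
          have heq : -(c - 460) = -(c - ronda - 460) + (-1) * ronda := by ring
          rw [heq, Int.add_mul_ediv_right _ _ (by omega : ronda ≠ 0)]
          ring
      · rw [dif_neg h]
        have hc0 : c - 460 ≤ 0 := by omega
        rw [if_pos hc0]

-- ===== VERDICT (by name: the statement is the Claim_ definition above) =====
theorem centrar_cartas_spec : Claim_equal_centrar_cartas := by
  intro ronda _ hpre
  unfold Spec_centrar_cartas centrar_cartas centrar_cartas_alt
  have hr : 0 < ronda := hpre
  rw [foldl_build]
  rw [PySem.List.length_pyRange_one]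
  have hlen : ((ronda - 0).toNat : Int) = ronda := by omega
  simp only [List.nil_append, hlen]
  rw [loopA_replicate]
  have hn : (ronda - 0).toNat = ((ronda - 0).toNat - 1) + 1 := by omega
  rw [hn, List.replicate_succ, PySem.List.pyGet?_zero_cons, Option.getD_some]
  rw [stepCount_closed ronda hr]
  have harith : 70 + 70 * ronda - 460 = 70 * ronda - 390 := by ring
  rw [harith]
  by_cases hx : 70 * ronda - 390 ≤ 0
  · simp [hx]
  · rw [if_neg hx, if_neg hx]
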